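-- pv_equiv track=rewrite | github.com/crdndorian-dev/prediction-market-pricing-analysis | src/webapp/backend/app/services/calibrate_models.py | _parse_onehot_raw_feature
-- ===== SOURCE A (Python) =====
-- from typing import Any, Dict, List, Optional, Tuple
--
-- def _parse_onehot_raw_feature(
--     raw_name: str,
--     categorical_candidates: List[str],
-- ) -> Tuple[Optional[str], Optional[str]]:
--     best_col: Optional[str] = None
--     best_cat: Optional[str] = None
--     for cand in sorted({c for c in categorical_candidates if c}, key=len, reverse=True):
--         if raw_name == cand:
--             return cand, None
--         prefix = f"{cand}_"
--         if raw_name.startswith(prefix):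
--             cat = raw_name[len(prefix):]
--             best_col = cand
--             best_cat = cat
--             break
--     if best_col is not None:
--         return best_col, best_cat
--     if "_" in raw_name:
--         col_guess, cat_guess = raw_name.rsplit("_", 1)
--         return col_guess or None, cat_guess or None
--     return None, None
-- ===== SOURCE B (Python) =====
-- def _parse_onehot_raw_feature(raw_name, categorical_candidates):
--     cands = {c for c in categorical_candidates if c}
--     if raw_name in cands:
--         return raw_name, None
--     last_us = None
--     for i in range(len(raw_name) - 1, -1, -1):
--         if raw_name[i] == "_":
--             if last_us is None:
--                 last_us = i
--             if raw_name[:i] in cands: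
--                 return raw_name[:i], raw_name[i + 1:]
--     if last_us is None:
--         return None, None
--     return raw_name[:last_us] or None, raw_name[last_us + 1:] or None
-- ===== Notes on version B (the rewrite author's own statement) =====
-- stated objective: idiomatic
-- what changed: Instead of sorting the deduplicated candidates by length and scanning them all for an exact or prefix match plus a separate rsplit fallback, B does one hash-set membership test for the exact match and a single right-to-left pass over raw_name's characters that both tries raw_name[:i] against the set at each underscore (longest prefix first) and records the rightmost underscore for the fallback split, so no sort and no second pass.
import Mathlib
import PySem

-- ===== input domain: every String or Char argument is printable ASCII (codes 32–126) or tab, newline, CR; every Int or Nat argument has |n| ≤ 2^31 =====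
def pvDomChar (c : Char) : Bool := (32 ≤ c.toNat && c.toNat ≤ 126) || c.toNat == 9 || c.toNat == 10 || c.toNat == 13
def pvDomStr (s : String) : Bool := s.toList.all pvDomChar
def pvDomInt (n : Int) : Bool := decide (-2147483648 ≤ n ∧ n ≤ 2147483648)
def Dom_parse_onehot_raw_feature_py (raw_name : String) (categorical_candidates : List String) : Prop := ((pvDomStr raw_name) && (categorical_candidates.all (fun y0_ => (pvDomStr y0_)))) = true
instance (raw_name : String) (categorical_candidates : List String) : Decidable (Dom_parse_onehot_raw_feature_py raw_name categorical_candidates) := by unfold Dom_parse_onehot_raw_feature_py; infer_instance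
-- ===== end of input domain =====

-- B replaces A's sort-candidates-by-length-and-scan-all (plus a separate rsplit fallback) with one
-- set-membership test and a single right-to-left pass over raw_name that tries each underscore
-- position as a split point and records the rightmost underscore for the fallback; same results.

-- ===== PORT A =====
-- A's loop: first candidate (in the given order) equal to raw or whose cand+"_" prefixes raw
def pvLoopA (raw : List Char) : List (List Char) → Option (List Char × Option (List Char))
  | [] => none
  | cand :: rest =>
    if raw = cand then some (cand, none)
    else if PySem.Chars.startswith raw (cand ++ ['_']) then
      some (cand, some (PySem.List.slice raw (some ((cand.length + 1 : Nat) : Int)) none))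
    else pvLoopA raw rest

-- hand port of raw_name.rsplit("_", 1)'s split point: index of the LAST '_' (exact: rsplit with
-- maxsplit 1 splits at the last occurrence; only consulted when '_' occurs in raw)
def pvLastUS : List Char → Option Nat
  | [] => none
  | c :: t =>
    match pvLastUS t with
    | some j => some (j + 1)
    | none => if c = '_' then some 0 else none

def parse_onehot_raw_feature_py (raw_name : String) (categorical_candidates : List String) : Option String × Option String :=
  let raw := raw_name.toList
  let pool := PySem.List.sorted
      (PySem.Set.ofList ((categorical_candidates.map String.toList).filter (fun c => !c.isEmpty)))
      (fun c => c.length) true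
  match pvLoopA raw pool with
  | some (col, cat) => (some (String.ofList col), cat.map String.ofList)
  | none =>
    if PySem.Chars.isIn ['_'] raw then
      match pvLastUS raw with
      | some j =>
        ((if raw.take j = [] then none else some (String.ofList (raw.take j))),
         (if raw.drop (j + 1) = [] then none else some (String.ofList (raw.drop (j + 1)))))
      | none => (none, none)  -- unreachable: '_' ∈ raw
    else (none, none)

-- ===== PORT B =====
-- B's fallback: split at the recorded rightmost underscore (none = no underscore seen)
def pvFbB (raw : List Char) : Option Nat → Option String × Option String
  | none => (none, none)
  | some j =>
    ((if raw.take j = [] then none else some (String.ofList (raw.take j))),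
     (if raw.drop (j + 1) = [] then none else some (String.ofList (raw.drop (j + 1)))))

-- B's single pass: i = n-1, …, 0; at each '_' record it if first seen and try raw[:i] in the set
def pvScanB (raw : List Char) (s : PySem.Set (List Char)) : Option Nat → Nat → Option String × Option String
  | last, 0 => pvFbB raw last
  | last, n + 1 =>
    if raw[n]? == some '_' then
      if PySem.Set.contains s (raw.take n) then
        (some (String.ofList (raw.take n)), some (String.ofList (raw.drop (n + 1))))
      else pvScanB raw s (some (last.getD n)) n
    else pvScanB raw s last n

def parse_onehot_raw_feature_py_alt (raw_name : String) (categorical_candidates : List String) : Option String × Option String :=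
  let raw := raw_name.toList
  let s := PySem.Set.ofList ((categorical_candidates.map String.toList).filter (fun c => !c.isEmpty))
  if PySem.Set.contains s raw then (some raw_name, none)
  else pvScanB raw s none raw.length

-- ===== PRECONDITION & SPEC =====
def Spec_parse_onehot_raw_feature_py (raw_name : String) (categorical_candidates : List String) (out : Option String × Option String) : Prop := out = parse_onehot_raw_feature_py_alt raw_name categorical_candidates
instance (raw_name : String) (categorical_candidates : List String) (out : Option String × Option String) : Decidable (Spec_parse_onehot_raw_feature_py raw_name categorical_candidates out) := by unfold Spec_parse_onehot_raw_feature_py; infer_instance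

-- ===== CLAIM (what is proved, stated in full; the proofs are below) =====
def Claim_equal_parse_onehot_raw_feature_py : Prop := ∀ (raw_name : String) (categorical_candidates : List String), Dom_parse_onehot_raw_feature_py raw_name categorical_candidates → Spec_parse_onehot_raw_feature_py raw_name categorical_candidates (parse_onehot_raw_feature_py raw_name categorical_candidates)

-- ===== LEMMAS AND PROOFS =====

-- a prefix match "cand + '_' prefixes raw" is exactly "raw[len] = '_' and raw[:len] = cand"
theorem pv_prefix_iff (raw c : List Char) :
    PySem.Chars.startswith raw (c ++ ['_']) = true ↔ raw[c.length]? = some '_' ∧ raw.take c.length = c := by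
  rw [PySem.Chars.startswith_iff]
  constructor
  · rintro ⟨t, ht⟩
    subst ht
    simp
  · rintro ⟨h1, h2⟩
    have hlt : c.length < raw.length := (List.getElem?_eq_some_iff.mp h1).1
    have : raw.take (c.length + 1) = c ++ ['_'] := by
      rw [List.take_add_one, h1, h2]; rfl
    exact this ▸ List.take_prefix _ _

theorem pv_loopA_mem (raw : List Char) (pool : List (List Char))
    (hpw : pool.Pairwise (fun a b => b.length ≤ a.length)) (hmem : raw ∈ pool) :
    pvLoopA raw pool = some (raw, none) := by
  induction pool with
  | nil => simp at hmem
  | cons c rest ih =>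
    by_cases he : raw = c
    · simp [pvLoopA, he]
    · have hr : raw ∈ rest := (List.mem_cons.mp hmem).resolve_left he
      have hlen : raw.length ≤ c.length := (List.pairwise_cons.mp hpw).1 raw hr
      have hsw : PySem.Chars.startswith raw (c ++ ['_']) = false := by
        by_contra h
        have := (pv_prefix_iff raw c).mp (by revert h; cases PySem.Chars.startswith raw (c ++ ['_']) <;> simp)
        have := (List.getElem?_eq_some_iff.mp this.1).1
        omega
      simp [pvLoopA, he, hsw]
      exact ih (List.pairwise_cons.mp hpw).2 hr

theorem pv_loopA_none (raw : List Char) (pool : List (List Char))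
    (h : ∀ c ∈ pool, raw ≠ c ∧ PySem.Chars.startswith raw (c ++ ['_']) = false) :
    pvLoopA raw pool = none := by
  induction pool with
  | nil => rfl
  | cons c rest ih =>
    obtain ⟨h1, h2⟩ := h c (by simp)
    simp [pvLoopA, h1, h2]
    exact ih (fun c hc => h c (by simp [hc]))

theorem pv_loopA_prefix (raw : List Char) (pool : List (List Char)) (c₀ : List Char)
    (hpw : pool.Pairwise (fun a b => b.length ≤ a.length))
    (hnm : raw ∉ pool) (hc₀ : c₀ ∈ pool)
    (hp₀ : PySem.Chars.startswith raw (c₀ ++ ['_']) = true)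
    (hmax : ∀ c ∈ pool, PySem.Chars.startswith raw (c ++ ['_']) = true → c.length ≤ c₀.length) :
    pvLoopA raw pool = some (c₀, some (raw.drop (c₀.length + 1))) := by
  induction pool with
  | nil => simp at hc₀
  | cons c rest ih =>
    have hne : raw ≠ c := fun h => hnm (by simp [h])
    by_cases hsw : PySem.Chars.startswith raw (c ++ ['_']) = true
    · have hceq : c = c₀ := by
        rcases List.mem_cons.mp hc₀ with h | h
        · exact h.symm
        · have h1 : c₀.length ≤ c.length := (List.pairwise_cons.mp hpw).1 c₀ h
          have h2 : c.length ≤ c₀.length := hmax c (by simp) hsw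
          have e1 := ((pv_prefix_iff raw c).mp hsw).2
          have e2 := ((pv_prefix_iff raw c₀).mp hp₀).2
          have : c.length = c₀.length := le_antisymm h2 h1
          rw [← e1, ← e2, this]
      subst hceq
      have hsl : PySem.List.slice raw (some ((c.length + 1 : Nat) : Int)) none = raw.drop (c.length + 1) :=
        PySem.List.slice_from_natCast raw (c.length + 1)
      push_cast at hsl
      simp [pvLoopA, hne, hsw, hsl]
    · have hc₀' : c₀ ∈ rest := by
        rcases List.mem_cons.mp hc₀ with h | h
        · subst h; exact absurd hp₀ hsw
        · exact h
      have hsw' : PySem.Chars.startswith raw (c ++ ['_']) = false := by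
        revert hsw; cases PySem.Chars.startswith raw (c ++ ['_']) <;> simp
      simp [pvLoopA, hne, hsw']
      exact ih (List.pairwise_cons.mp hpw).2 (fun h => hnm (by simp [h])) hc₀'
        (fun c hc => hmax c (by simp [hc]))

-- pvLastUS spec: none ↔ no underscore; some j means j is the last underscore position
theorem pvLastUS_none (t : List Char) (h : pvLastUS t = none) : ∀ i : Nat, t[i]? ≠ some '_' := by
  induction t with
  | nil => intro i; simp
  | cons c t ih =>
    intro i
    simp only [pvLastUS] at h
    rcases ht : pvLastUS t with _ | j
    · rw [ht] at h
      have hc : c ≠ '_' := by by_contra hc; simp [hc] at h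
      cases i with
      | zero => simp [hc]
      | succ m => simpa using ih ht m
    · rw [ht] at h; simp at h

theorem pvLastUS_some (t : List Char) (j : Nat) (h : pvLastUS t = some j) :
    t[j]? = some '_' ∧ ∀ i : Nat, j < i → t[i]? ≠ some '_' := by
  induction t generalizing j with
  | nil => simp [pvLastUS] at h
  | cons c t ih =>
    simp only [pvLastUS] at h
    rcases ht : pvLastUS t with _ | j'
    · rw [ht] at h
      have hc : c = '_' := by by_contra hc; simp [hc] at h
      have hj : j = 0 := by by_contra hj; simp [hc] at h; omega
      subst hj
      refine ⟨by simp [hc], ?_⟩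
      intro i hi
      cases i with
      | zero => omega
      | succ m => simpa using pvLastUS_none t ht m
    · rw [ht] at h
      have hj : j = j' + 1 := by simpa using h.symm
      subst hj
      obtain ⟨h1, h2⟩ := ih j' ht
      refine ⟨by simpa using h1, ?_⟩
      intro i hi
      cases i with
      | zero => omega
      | succ m => simpa using h2 m (by omega)

-- the scan's matching condition at position i
def pvCondB (raw : List Char) (s : PySem.Set (List Char)) (i : Nat) : Bool :=
  (raw[i]? == some '_') && PySem.Set.contains s (raw.take i)

theorem pvCondB_iff (raw : List Char) (s : PySem.Set (List Char)) (i : Nat) :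
    pvCondB raw s i = true ↔ raw[i]? = some '_' ∧ PySem.Set.contains s (raw.take i) = true := by
  simp [pvCondB]

theorem pv_scanB_match (raw : List Char) (s : PySem.Set (List Char)) (n i : Nat)
    (hi : i < n) (hc : pvCondB raw s i = true)
    (hmax : ∀ j, i < j → j < n → pvCondB raw s j = false) :
    ∀ last, pvScanB raw s last n
      = (some (String.ofList (raw.take i)), some (String.ofList (raw.drop (i + 1)))) := by
  induction n with
  | zero => omega
  | succ m ih =>
    intro last
    obtain ⟨hc1, hc2⟩ := (pvCondB_iff raw s i).mp hc
    by_cases him : i = m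
    · subst him
      have hmem : raw.take i ∈ s := (PySem.Set.contains_iff _ _).mp hc2
      simp [pvScanB, hc1, hmem]
    · have hnc := hmax m (by omega) (by omega)
      simp only [pvScanB]
      by_cases hus : raw[m]? = some '_'
      · have hct : PySem.Set.contains s (raw.take m) = false := by
          by_contra h
          have : pvCondB raw s m = true := (pvCondB_iff raw s m).mpr
            ⟨hus, by revert h; cases PySem.Set.contains s (raw.take m) <;> simp⟩
          rw [hnc] at this; exact Bool.false_ne_true this
        simp only [hus, hct, beq_self_eq_true, if_true, Bool.false_eq_true, if_false]
        exact ih (by omega) (fun j h1 h2 => hmax j h1 (by omega)) _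
      · simp only [beq_iff_eq, hus, if_false]
        exact ih (by omega) (fun j h1 h2 => hmax j h1 (by omega)) _

theorem pv_scanB_acc (raw : List Char) (s : PySem.Set (List Char)) (j : Nat) (n : Nat)
    (h : ∀ i < n, pvCondB raw s i = false) :
    pvScanB raw s (some j) n = pvFbB raw (some j) := by
  induction n with
  | zero => rfl
  | succ m ih =>
    simp only [pvScanB]
    by_cases hus : raw[m]? = some '_'
    · have hct : PySem.Set.contains s (raw.take m) = false := by
        by_contra hc
        have : pvCondB raw s m = true := (pvCondB_iff raw s m).mpr
          ⟨hus, by revert hc; cases PySem.Set.contains s (raw.take m) <;> simp⟩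
        rw [h m (by omega)] at this; exact Bool.false_ne_true this
      simp only [hus, hct, beq_self_eq_true, if_true, Bool.false_eq_true, if_false, Option.getD_some]
      exact ih (fun i hi => h i (by omega))
    · simp only [beq_iff_eq, hus, if_false]
      exact ih (fun i hi => h i (by omega))

theorem pv_scanB_noUS (raw : List Char) (s : PySem.Set (List Char)) (n : Nat)
    (h : ∀ i < n, raw[i]? ≠ some '_') :
    pvScanB raw s none n = pvFbB raw none := by
  induction n with
  | zero => rfl
  | succ m ih =>
    simp only [pvScanB, beq_iff_eq, h m (by omega), if_false]
    exact ih (fun i hi => h i (by omega))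

theorem pv_scanB_fb (raw : List Char) (s : PySem.Set (List Char)) (n k : Nat)
    (hk : k < n) (hus : raw[k]? = some '_') (hlast : ∀ i : Nat, k < i → raw[i]? ≠ some '_')
    (hnc : ∀ i < n, pvCondB raw s i = false) :
    pvScanB raw s none n = pvFbB raw (some k) := by
  induction n with
  | zero => omega
  | succ m ih =>
    by_cases hkm : k = m
    · subst hkm
      have hct : PySem.Set.contains s (raw.take k) = false := by
        by_contra hc
        have : pvCondB raw s k = true := (pvCondB_iff raw s k).mpr
          ⟨hus, by revert hc; cases PySem.Set.contains s (raw.take k) <;> simp⟩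
        rw [hnc k (by omega)] at this; exact Bool.false_ne_true this
      simp only [pvScanB, hus, hct, beq_self_eq_true, if_true, Bool.false_eq_true, if_false,
        Option.getD_none]
      exact pv_scanB_acc raw s k k (fun i hi => hnc i (by omega))
    · have hm : raw[m]? ≠ some '_' := hlast m (by omega)
      simp only [pvScanB, beq_iff_eq, hm, if_false]
      exact ih (by omega) (fun i hi => hnc i (by omega))

theorem parse_onehot_raw_feature_py_eq (raw_name : String) (categorical_candidates : List String) :
    parse_onehot_raw_feature_py raw_name categorical_candidates
      = parse_onehot_raw_feature_py_alt raw_name categorical_candidates := by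
  simp only [parse_onehot_raw_feature_py, parse_onehot_raw_feature_py_alt]
  set raw := raw_name.toList with hraw
  set s := PySem.Set.ofList ((categorical_candidates.map String.toList).filter (fun c => !c.isEmpty)) with hs
  set pool := PySem.List.sorted s (fun c => c.length) true with hpool
  have hpw : pool.Pairwise (fun a b => b.length ≤ a.length) :=
    PySem.List.sorted_pairwise_rev s (fun c => c.length)
  have hmemp : ∀ c, c ∈ pool ↔ c ∈ s := fun c => PySem.List.mem_sorted s (fun c => c.length) true c
  have hsne : ∀ c ∈ s, c ≠ [] := by
    intro c hc hce
    have := (PySem.Set.mem_ofList _ _).mp hc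
    simp [hce] at this
  have hcond : ∀ i, pvCondB raw s i = true ↔
      (raw[i]? = some '_' ∧ raw.take i ∈ s) := by
    intro i
    rw [pvCondB_iff, PySem.Set.contains_iff]
  have hswc : ∀ c ∈ s, (PySem.Chars.startswith raw (c ++ ['_']) = true ↔
      (pvCondB raw s c.length = true ∧ raw.take c.length = c)) := by
    intro c hc
    rw [pv_prefix_iff, hcond]
    constructor
    · rintro ⟨h1, h2⟩; exact ⟨⟨h1, by rw [h2]; exact hc⟩, h2⟩
    · rintro ⟨⟨h1, _⟩, h2⟩; exact ⟨h1, h2⟩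
  by_cases hex : raw ∈ s
  · rw [pv_loopA_mem raw pool hpw ((hmemp raw).mpr hex)]
    have hct : PySem.Set.contains s raw = true := (PySem.Set.contains_iff _ _).mpr hex
    rw [if_pos hct]
    simp [hraw]
  · have hcontf : PySem.Set.contains s raw = false := by
      revert hex
      rw [← PySem.Set.contains_iff]
      cases PySem.Set.contains s raw <;> simp
    simp only [hcontf, Bool.false_eq_true, if_false]
    by_cases hpm : ∃ i, i < raw.length ∧ pvCondB raw s i = true
    · -- a prefix match exists: both take the longest one
      classical
      set i₀ := Nat.findGreatest (fun i => pvCondB raw s i = true) raw.length with hi₀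
      obtain ⟨i, hilt, hci⟩ := hpm
      have hc₀ : pvCondB raw s i₀ = true :=
        Nat.findGreatest_spec (P := fun i => pvCondB raw s i = true) (le_of_lt hilt) hci
      have hi₀lt : i₀ < raw.length := (List.getElem?_eq_some_iff.mp ((hcond i₀).mp hc₀).1).1
      have htlen : (raw.take i₀).length = i₀ := by simp; omega
      have hc₀s : raw.take i₀ ∈ s := ((hcond i₀).mp hc₀).2
      have hsw₀ : PySem.Chars.startswith raw (raw.take i₀ ++ ['_']) = true := by
        rw [pv_prefix_iff, htlen]
        exact ⟨((hcond i₀).mp hc₀).1, rfl⟩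
      have hmax : ∀ c ∈ pool, PySem.Chars.startswith raw (c ++ ['_']) = true → c.length ≤ (raw.take i₀).length := by
        intro c hc hsw
        have hcs := (hmemp c).mp hc
        have := ((hswc c hcs).mp hsw).1
        rw [htlen]
        by_contra hgt
        push_neg at hgt
        have hclt : c.length < raw.length :=
          (List.getElem?_eq_some_iff.mp ((pv_prefix_iff raw c).mp hsw).1).1
        exact absurd this (by simpa using Nat.findGreatest_is_greatest hgt (le_of_lt hclt))
      have hnp : raw ∉ pool := fun h => hex ((hmemp raw).mp h)
      rw [pv_loopA_prefix raw pool (raw.take i₀) hpw hnp ((hmemp _).mpr hc₀s) hsw₀ hmax]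
      rw [pv_scanB_match raw s raw.length i₀ hi₀lt hc₀
            (fun j hj1 hj2 => by
              have := Nat.findGreatest_is_greatest (P := fun i => pvCondB raw s i = true) hj1 (le_of_lt hj2)
              simpa using this)]
      simp [htlen]
    · -- no prefix match, no exact match: both fall through to the last-'_' fallback
      push_neg at hpm
      have hnc' : ∀ i, pvCondB raw s i = false := by
        intro i
        by_cases hlt : i < raw.length
        · simpa using hpm i hlt
        · rcases hb : pvCondB raw s i with _ | _
          · rfl
          · exfalso
            have := (List.getElem?_eq_some_iff.mp ((hcond i).mp hb).1).1
            omega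
      rw [pv_loopA_none raw pool (by
        intro c hc
        have hcs := (hmemp c).mp hc
        refine ⟨fun h => hex (h ▸ hcs), ?_⟩
        by_contra hsw
        have hsw' : PySem.Chars.startswith raw (c ++ ['_']) = true := by
          revert hsw; cases PySem.Chars.startswith raw (c ++ ['_']) <;> simp
        have := ((hswc c hcs).mp hsw').1
        rw [hnc' c.length] at this
        exact Bool.false_ne_true this)]
      rcases hlu : pvLastUS raw with _ | k
      · -- no underscore at all
        have hnoUS : ∀ i : Nat, raw[i]? ≠ some '_' := pvLastUS_none raw hlu
        have hii : PySem.Chars.isIn ['_'] raw = false := by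
          rw [PySem.Chars.isIn_eq_false_iff]
          intro hinf
          have hm : '_' ∈ raw := hinf.mem (by simp)
          obtain ⟨i, hi⟩ := List.mem_iff_getElem?.mp hm
          exact hnoUS i hi
        rw [hii]
        simp only [Bool.false_eq_true, if_false]
        rw [pv_scanB_noUS raw s raw.length (fun i _ => hnoUS i)]
        rfl
      · -- underscore present: both split at the last one
        obtain ⟨hk1, hk2⟩ := pvLastUS_some raw k hlu
        have hklt : k < raw.length := (List.getElem?_eq_some_iff.mp hk1).1
        have hii : PySem.Chars.isIn ['_'] raw = true := by
          rw [PySem.Chars.isIn_iff_infix]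
          have hkel : raw[k] = '_' := by
            have := hk1; rwa [List.getElem?_eq_getElem hklt, Option.some_inj] at this
          exact ⟨raw.take k, raw.drop (k + 1), by
            rw [← hkel]
            calc raw.take k ++ [raw[k]] ++ raw.drop (k + 1)
                = raw.take k ++ ([raw[k]] ++ raw.drop (k + 1)) := by rw [List.append_assoc]
              _ = raw.take k ++ raw.drop k := by rw [List.singleton_append, List.getElem_cons_drop hklt]
              _ = raw := List.take_append_drop k raw⟩
        rw [hii]
        simp only [if_true]
        rw [pv_scanB_fb raw s raw.length k hklt hk1 hk2 (fun i _ => hnc' i)]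
        rfl

-- ===== VERDICT (by name: the statement is the Claim_ definition above) =====
theorem parse_onehot_raw_feature_py_spec : Claim_equal_parse_onehot_raw_feature_py := by
  intro raw_name categorical_candidates _
  exact parse_onehot_raw_feature_py_eq raw_name categorical_candidates
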